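-- pv_equiv track=rewrite | github.com/wuhaotian0508/biojson | rag/skills/crispr_experiment/gene2accession.py | _pick_best_accession
-- ===== SOURCE A (Python) =====
-- from typing import List, Optional
--
-- def _pick_best_accession(records: List[dict], gene_name: str) -> str:
--     """
--     从候选 Nuccore 记录中选择最适合的 accession。
--
--     选择优先级（从高到低）：
--     1. 标题中含目标基因名 且 含 mRNA/cDNA/transcript 关键词的记录
--     2. 标题中含目标基因名的记录（无转录本类型约束）
--     3. 标题中含 mRNA/cDNA/transcript 关键词的记录（不含基因名）
--     4. 第一条记录（兜底）
--
--     优先选择 mRNA/cDNA 记录，是因为它们通常只含编码区序列，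
--     长度适中，适合 CRISPR 靶点设计（避免基因组序列中的内含子干扰）。
--
--     参数:
--         records:   候选摘要列表（来自 _fetch_nuccore_summaries）
--         gene_name: 目标基因名，用于标题匹配
--
--     返回:
--         最佳 accession 字符串；无候选时返回空字符串
--     """
--     if not records:
--         return ""
--
--     gene_name_lower = gene_name.lower()   # 转小写便于不区分大小写比较
--
--     # exact_gene: 标题中明确包含目标基因名的记录子集
--     exact_gene = [r for r in records if gene_name_lower in r.get("title", "").lower()]
--
--     if exact_gene:
--         # transcript_like: 在含基因名的记录中进一步筛选 mRNA/cDNA 类型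
--         transcript_like = [
--             r for r in exact_gene
--             if any(k in r.get("title", "").lower() for k in ["mrna", "cdna", "transcript"])
--         ]
--         # 有转录本记录优先选第一个，否则选含基因名的第一个
--         return (transcript_like[0] if transcript_like else exact_gene[0]).get("accession", "")
--
--     # 没有含基因名的记录时，退而求其次选转录本类型记录
--     transcript_like = [
--         r for r in records
--         if any(k in r.get("title", "").lower() for k in ["mrna", "cdna", "transcript"])
--     ]
--     if transcript_like:
--         return transcript_like[0].get("accession", "")
--
--     # 最后兜底：返回第一条记录的 accession
--     return records[0].get("accession", "")
-- ===== SOURCE B (Python) =====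
-- def _pick_best_accession(records, gene_name):
--     """One pass: rank each record (0 gene+transcript-kw, 1 gene only,
--     2 kw only, 3 neither) and keep the first record with the minimal rank."""
--     if not records:
--         return ""
--     gene_name_lower = gene_name.lower()
--
--     def rank(r):
--         title = r.get("title", "").lower()
--         has_gene = gene_name_lower in title
--         has_kw = ("mrna" in title) or ("cdna" in title) or ("transcript" in title)
--         if has_gene and has_kw:
--             return 0
--         if has_gene:
--             return 1
--         if has_kw:
--             return 2
--         return 3
--
--     best = records[0]
--     best_rank = rank(best)
--     for r in records[1:]:
--         rr = rank(r)
--         if rr < best_rank: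
--             best, best_rank = r, rr
--     return best.get("accession", "")
-- ===== Notes on version B (the rewrite author's own statement) =====
-- stated objective: simpler
-- what changed: Replaces the cascade of list-comprehension filters and fallback branches by a single pass that assigns each record a priority rank (0 gene+transcript keyword, 1 gene only, 2 keyword only, 3 neither) and keeps the first record with the minimal rank.
import Mathlib
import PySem

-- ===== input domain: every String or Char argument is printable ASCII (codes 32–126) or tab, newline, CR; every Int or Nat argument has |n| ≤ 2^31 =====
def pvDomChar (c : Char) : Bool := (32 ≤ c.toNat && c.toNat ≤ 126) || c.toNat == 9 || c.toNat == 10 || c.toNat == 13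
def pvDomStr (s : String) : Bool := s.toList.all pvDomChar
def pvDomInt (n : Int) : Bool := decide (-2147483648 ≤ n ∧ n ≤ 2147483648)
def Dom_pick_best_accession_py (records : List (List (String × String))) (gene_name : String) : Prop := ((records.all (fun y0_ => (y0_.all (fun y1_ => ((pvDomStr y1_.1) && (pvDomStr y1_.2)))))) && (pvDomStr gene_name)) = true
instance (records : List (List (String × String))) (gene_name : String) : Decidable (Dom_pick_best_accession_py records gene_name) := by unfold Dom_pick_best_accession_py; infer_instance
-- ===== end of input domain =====

-- ===== PORT A =====
-- B changes only the decomposition (one ranked pass instead of cascaded filters); same results, no speed claim.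
def pick_best_accession_py (records : List (List (String × String))) (gene_name : String) : String :=
  if records.isEmpty then "" else
  let gene_name_lower := PySem.Str.lower gene_name
  let exact_gene := records.filter (fun r =>
    PySem.Str.isIn gene_name_lower (PySem.Str.lower ((PySem.Dict.ofList r).getD "title" "")))
  if !exact_gene.isEmpty then
    let transcript_like := exact_gene.filter (fun r =>
      ["mrna", "cdna", "transcript"].any (fun k =>
        PySem.Str.isIn k (PySem.Str.lower ((PySem.Dict.ofList r).getD "title" ""))))
    (PySem.Dict.ofList ((if !transcript_like.isEmpty then transcript_like else exact_gene).headD [])).getD "accession" ""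
  else
    let transcript_like := records.filter (fun r =>
      ["mrna", "cdna", "transcript"].any (fun k =>
        PySem.Str.isIn k (PySem.Str.lower ((PySem.Dict.ofList r).getD "title" ""))))
    if !transcript_like.isEmpty then
      (PySem.Dict.ofList (transcript_like.headD [])).getD "accession" ""
    else
      (PySem.Dict.ofList (records.headD [])).getD "accession" ""

-- ===== PORT B =====
-- rank of one record: 0 gene+keyword, 1 gene only, 2 keyword only, 3 neither (Source B's `rank`)
def pvRank (gene_name_lower : String) (r : List (String × String)) : Nat :=
  let title := PySem.Str.lower ((PySem.Dict.ofList r).getD "title" "")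
  let has_gene := PySem.Str.isIn gene_name_lower title
  let has_kw := PySem.Str.isIn "mrna" title || PySem.Str.isIn "cdna" title || PySem.Str.isIn "transcript" title
  if has_gene && has_kw then 0
  else if has_gene then 1
  else if has_kw then 2
  else 3

def pick_best_accession_py_alt (records : List (List (String × String))) (gene_name : String) : String :=
  match records with
  | [] => ""
  | r0 :: rest =>
    let gene_name_lower := PySem.Str.lower gene_name
    let best := rest.foldl
      (fun (b : List (String × String) × Nat) r =>
        let rr := pvRank gene_name_lower r
        if rr < b.2 then (r, rr) else b)
      (r0, pvRank gene_name_lower r0)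
    (PySem.Dict.ofList best.1).getD "accession" ""

-- ===== PRECONDITION & SPEC =====
def Spec_pick_best_accession_py (records : List (List (String × String))) (gene_name : String) (out : String) : Prop := out = pick_best_accession_py_alt records gene_name
instance (records : List (List (String × String))) (gene_name : String) (out : String) : Decidable (Spec_pick_best_accession_py records gene_name out) := by unfold Spec_pick_best_accession_py; infer_instance

-- ===== CLAIM (what is proved, stated in full; the proofs are below) =====
def Claim_equal_pick_best_accession_py : Prop := ∀ (records : List (List (String × String))) (gene_name : String), Dom_pick_best_accession_py records gene_name → Spec_pick_best_accession_py records gene_name (pick_best_accession_py records gene_name)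

-- ===== LEMMAS AND PROOFS =====

-- "first record of minimal rank" written as a chain of find?s over the four possible ranks
def pvChain {A : Type} (f : A -> Nat) (a : A) (l : List A) : A :=
  match (a :: l).find? (fun r => f r == 0) with
  | some r => r
  | none =>
    match (a :: l).find? (fun r => f r == 1) with
    | some r => r
    | none =>
      match (a :: l).find? (fun r => f r == 2) with
      | some r => r
      | none => a

theorem pvFind?_congr {A : Type} {p q : A -> Bool} {l : List A}
    (h : ∀ x ∈ l, p x = q x) : l.find? p = l.find? q := by
  induction l with
  | nil => rfl
  | cons x xs ih =>
    simp only [List.find?, h x (by simp)]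
    cases hq : q x
    · exact ih (fun y hy => h y (by simp [hy]))
    · rfl

theorem pvChain_cons_lt {A : Type} (f : A -> Nat) (hf : ∀ r : A, f r ≤ 3)
    (a x : A) (l : List A) (h : f x < f a) :
    pvChain f a (x :: l) = pvChain f x l := by
  have ha := hf a
  have hx := hf x
  unfold pvChain
  interval_cases hfx : (f x) <;> interval_cases hfa : (f a) <;>
    simp_all [List.find?]

theorem pvChain_cons_ge {A : Type} (f : A -> Nat) (hf : ∀ r : A, f r ≤ 3)
    (a x : A) (l : List A) (h : f a ≤ f x) :
    pvChain f a (x :: l) = pvChain f a l := by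
  have ha := hf a
  have hx := hf x
  unfold pvChain
  interval_cases hfa : (f a) <;> interval_cases hfx : (f x) <;>
    simp_all [List.find?]

theorem pvFold_eq_chain {A : Type} (f : A -> Nat) (hf : ∀ r : A, f r ≤ 3) :
    ∀ (l : List A) (a : A),
      (l.foldl (fun (b : A × Nat) r => if f r < b.2 then (r, f r) else b) (a, f a)).1
        = pvChain f a l := by
  intro l
  induction l with
  | nil =>
    intro a
    have ha := hf a
    unfold pvChain
    interval_cases hfa : (f a) <;> simp [List.find?, hfa]
  | cons x xs ih =>
    intro a
    by_cases h : f x < f a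
    · rw [List.foldl_cons, if_pos h, ih x, pvChain_cons_lt f hf a x xs h]
    · rw [List.foldl_cons, if_neg h, ih a, pvChain_cons_ge f hf a x xs (by omega)]

set_option maxHeartbeats 1000000 in
theorem pick_best_accession_py_spec_aux :
    ∀ (records : List (List (String × String))) (gene_name : String),
      pick_best_accession_py records gene_name = pick_best_accession_py_alt records gene_name := by
  intro records gene_name
  match records with
  | [] => rfl
  | r0 :: rest =>
    set gl := PySem.Str.lower gene_name with hgl
    -- abbreviations for the two predicates
    set pg : List (String × String) -> Bool := fun r =>
      PySem.Str.isIn gl (PySem.Str.lower ((PySem.Dict.ofList r).getD "title" "")) with hpg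
    set pk : List (String × String) -> Bool := fun r =>
      PySem.Str.isIn "mrna" (PySem.Str.lower ((PySem.Dict.ofList r).getD "title" "")) ||
      PySem.Str.isIn "cdna" (PySem.Str.lower ((PySem.Dict.ofList r).getD "title" "")) ||
      PySem.Str.isIn "transcript" (PySem.Str.lower ((PySem.Dict.ofList r).getD "title" "")) with hpk
    have hrank : ∀ r, pvRank gl r =
        if pg r && pk r then 0 else if pg r then 1 else if pk r then 2 else 3 := by
      intro r; rfl
    have hrank_le : ∀ r, pvRank gl r ≤ 3 := by
      intro r; rw [hrank r]; split_ifs <;> omega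
    -- B's side: the fold is the first record of minimal rank
    have hB0 : pick_best_accession_py_alt (r0 :: rest) gene_name =
        (PySem.Dict.ofList ((rest.foldl
          (fun (b : List (String × String) × Nat) r =>
            if pvRank gl r < b.2 then (r, pvRank gl r) else b)
          (r0, pvRank gl r0)).1)).getD "accession" "" := rfl
    have hB : pick_best_accession_py_alt (r0 :: rest) gene_name =
        (PySem.Dict.ofList (pvChain (pvRank gl) r0 rest)).getD "accession" "" := by
      rw [hB0, pvFold_eq_chain (pvRank gl) hrank_le rest r0]
    rw [hB]
    -- A's side
    unfold pick_best_accession_py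
    rw [← hgl]
    simp only [List.isEmpty_cons, Bool.false_eq_true, if_false]
    have hany : ∀ r : List (String × String),
        (["mrna", "cdna", "transcript"].any (fun k =>
          PySem.Str.isIn k (PySem.Str.lower ((PySem.Dict.ofList r).getD "title" "")))) = pk r := by
      intro r; simp [hpk, List.any, Bool.or_assoc]
    have hr0 : ∀ {p : List (String × String) -> Bool} {x : List (String × String)}
        {l : List (List (String × String))},
        (l.filter p) = x :: ((l.filter p).tail) → l.find? p = some x := by
      intro p x l hx
      rw [← List.head?_filter, hx]; rfl
    -- notation
    set L := r0 :: rest with hL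
    set eg := L.filter pg with heg
    by_cases hegne : eg.isEmpty
    · -- no record contains the gene: ranks are 2 or 3
      simp only [hegne, Bool.not_true, Bool.false_eq_true, if_false]
      have hnog : ∀ r ∈ L, pg r = false := by
        intro r hr
        by_contra hgr
        have : r ∈ eg := by
          rw [heg]; exact List.mem_filter.mpr ⟨hr, by simpa using hgr⟩
        rw [List.isEmpty_iff.mp hegne] at this
        simp at this
      have hfind0 : L.find? (fun r => pvRank gl r == 0) = none := by
        rw [List.find?_eq_none]
        intro r hr
        have hg := hnog r hr
        cases hk : pk r <;> simp_all [hrank]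
      have hfind1 : L.find? (fun r => pvRank gl r == 1) = none := by
        rw [List.find?_eq_none]
        intro r hr
        have hg := hnog r hr
        cases hk : pk r <;> simp_all [hrank]
      have hfind2 : L.find? (fun r => pvRank gl r == 2) = L.find? pk := by
        apply pvFind?_congr
        intro r hr
        have hg := hnog r hr
        cases hk : pk r <;> simp_all [hrank]
      simp only [hany]
      by_cases htl : (L.filter pk).isEmpty
      · simp only [htl, Bool.not_true, Bool.false_eq_true, if_false]
        have : L.find? pk = none := by
          rw [← List.head?_filter, List.isEmpty_iff.mp htl]; rfl
        unfold pvChain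
        rw [← hL, hfind0, hfind1, hfind2, this]
        rfl
      · simp only [htl, Bool.not_false, if_true]
        obtain ⟨x, xs, hx⟩ : ∃ x xs, L.filter pk = x :: xs := by
          rcases h' : L.filter pk with _ | ⟨x, xs⟩
          · rw [h'] at htl; simp at htl
          · exact ⟨x, xs, rfl⟩
        have hfind : L.find? pk = some x := by rw [← List.head?_filter, hx]; rfl
        unfold pvChain
        rw [← hL, hfind0, hfind1, hfind2, hfind]
        rw [hx]; rfl
    · -- some record contains the gene
      simp only [hegne, Bool.not_false, if_true]
      simp only [hany]
      have hff : eg.filter pk = L.filter (fun r => pg r && pk r) := by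
        rw [heg, List.filter_filter]
        apply List.filter_congr
        intro r hr
        simp [Bool.and_comm]
      by_cases htl : (eg.filter pk).isEmpty
      · -- gene records exist but none with a keyword: no rank-0 record
        simp only [htl, Bool.not_true, Bool.false_eq_true, if_false]
        have hno0 : ∀ r ∈ L, (pg r && pk r) = false := by
          intro r hr
          by_contra hc
          have : r ∈ L.filter (fun r => pg r && pk r) :=
            List.mem_filter.mpr ⟨hr, by simpa using hc⟩
          rw [← hff, List.isEmpty_iff.mp htl] at this
          simp at this
        have hfind0 : L.find? (fun r => pvRank gl r == 0) = none := by
          rw [List.find?_eq_none]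
          intro r hr
          have h0 := hno0 r hr
          cases hg : pg r <;> cases hk : pk r <;> simp_all [hrank]
        have hfind1 : L.find? (fun r => pvRank gl r == 1) = L.find? pg := by
          apply pvFind?_congr
          intro r hr
          have h0 := hno0 r hr
          cases hg : pg r <;> cases hk : pk r <;> simp_all [hrank]
        obtain ⟨x, xs, hx⟩ : ∃ x xs, eg = x :: xs := by
          rcases h' : eg with _ | ⟨x, xs⟩
          · rw [h'] at hegne; simp at hegne
          · exact ⟨x, xs, rfl⟩
        have hfind : L.find? pg = some x := by
          rw [← List.head?_filter, ← heg, hx]; rfl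
        unfold pvChain
        rw [← hL, hfind0, hfind1, hfind]
        rw [hx]; rfl
      · -- a rank-0 record exists
        simp only [htl, Bool.not_false, if_true]
        obtain ⟨x, xs, hx⟩ : ∃ x xs, eg.filter pk = x :: xs := by
          rcases h' : eg.filter pk with _ | ⟨x, xs⟩
          · rw [h'] at htl; simp at htl
          · exact ⟨x, xs, rfl⟩
        have hfind0 : L.find? (fun r => pvRank gl r == 0) = some x := by
          have : L.find? (fun r => pg r && pk r) = some x := by
            rw [← List.head?_filter, ← hff, hx]; rfl
          rw [← this]
          apply pvFind?_congr
          intro r hr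
          cases hg : pg r <;> cases hk : pk r <;> simp_all [hrank]
        unfold pvChain
        rw [← hL, hfind0]
        rw [hx]; rfl

-- ===== VERDICT (by name: the statement is the Claim_ definition above) =====
theorem pick_best_accession_py_spec : Claim_equal_pick_best_accession_py := by
  intro records gene_name _
  unfold Spec_pick_best_accession_py
  exact pick_best_accession_py_spec_aux records gene_name
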